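-- pv_equiv track=rewrite | github.com/suresh-vuppala/interview-ignite-lab | src/data/courses/dsa/two-pointers-sliding-window/sliding-window-variable-shortest/least-consecutive-cards-match/code/python/least_consecutive_cards_match.py | minimumCardPickupBruteForce
-- ===== SOURCE A (Python) =====
-- def minimumCardPickupBruteForce(cards):
--     n = len(cards)
--     min_len = float('inf')
--
--     # Check all subarrays
--     for i in range(n):
--         for j in range(i, n):
--             # Check if subarray has duplicates
--             seen = set()
--             has_duplicate = False
--
--             for k in range(i, j + 1):
--                 if cards[k] in seen:
--                     has_duplicate = True
--                     break
--                 seen.add(cards[k])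
--
--             if has_duplicate:
--                 min_len = min(min_len, j - i + 1)
--
--     return min_len if min_len != float('inf') else -1
-- ===== SOURCE B (Python) =====
-- def minimumCardPickupBruteForce(cards):
--     last = {}
--     best = None
--     for i, c in enumerate(cards):
--         if c in last:
--             gap = i - last[c] + 1
--             if best is None or gap < best:
--                 best = gap
--         last[c] = i
--     return best if best is not None else -1
-- ===== Notes on version B (the rewrite author's own statement) =====
-- stated objective: faster
-- what changed: Replaced the triple-nested scan over all subarrays with a single pass keeping a last-seen-index hashmap and taking the minimum gap between consecutive equal values.
import Mathlib
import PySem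

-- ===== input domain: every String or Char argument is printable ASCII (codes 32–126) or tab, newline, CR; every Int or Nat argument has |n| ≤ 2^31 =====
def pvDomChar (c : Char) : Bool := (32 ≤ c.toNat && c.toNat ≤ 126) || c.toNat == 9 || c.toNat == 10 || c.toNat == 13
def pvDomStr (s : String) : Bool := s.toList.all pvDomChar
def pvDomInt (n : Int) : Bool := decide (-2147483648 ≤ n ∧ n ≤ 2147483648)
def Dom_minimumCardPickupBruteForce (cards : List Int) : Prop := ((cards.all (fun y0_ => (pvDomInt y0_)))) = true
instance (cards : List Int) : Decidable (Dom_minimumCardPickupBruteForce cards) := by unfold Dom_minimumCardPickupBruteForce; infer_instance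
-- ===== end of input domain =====

-- B replaces A's O(n^3) scan of all subarrays with a single O(n) pass keeping a
-- last-seen-index hashmap and minimising the gap between consecutive equal values.

-- ===== PORT A =====
-- inner 'for k in range(i, j+1)' with the break: recursion returning at the first duplicate
def pvA_dupLoop (cards : List Int) (seen : PySem.Set Int) : List Int → Bool
  | [] => false
  | k :: ks =>
    -- cards[k]: k is always in range at A's call sites; pyGetD with default 0 is exact there
    let v := PySem.List.pyGetD cards k 0
    if PySem.Set.contains seen v then true
    else pvA_dupLoop cards (PySem.Set.add seen v) ks

def pvA_hasDup (cards : List Int) (i j : Int) : Bool :=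
  pvA_dupLoop cards PySem.Set.empty (PySem.List.pyRange i (j + 1))

def minimumCardPickupBruteForce (cards : List Int) : Int :=
  let n : Int := cards.length
  -- min_len: Option Int, none = float('inf')
  let ml : Option Int :=
    (PySem.List.pyRange 0 n).foldl (fun ml i =>
      (PySem.List.pyRange i n).foldl (fun ml j =>
        if pvA_hasDup cards i j then
          some (match ml with
                | none => j - i + 1
                | some m => min m (j - i + 1))
        else ml) ml) none
  match ml with
  | some m => m
  | none => -1

-- ===== PORT B =====
def pvB_loop (best : Option Int) (last : PySem.Dict Int Int) : List (Int × Int) → Option Int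
  | [] => best
  | (i, c) :: rest =>
    match PySem.Dict.get? last c with
    | some p =>
      let gap := i - p + 1
      let best' := match best with
        | none => some gap
        | some b => if gap < b then some gap else some b
      pvB_loop best' (last.insert c i) rest
    | none => pvB_loop best (last.insert c i) rest

def minimumCardPickupBruteForce_alt (cards : List Int) : Int :=
  match pvB_loop none PySem.Dict.empty (PySem.List.enumerate cards) with
  | some b => b
  | none => -1

-- ===== PRECONDITION & SPEC =====
def Spec_minimumCardPickupBruteForce (cards : List Int) (out : Int) : Prop := out = minimumCardPickupBruteForce_alt cards
instance (cards : List Int) (out : Int) : Decidable (Spec_minimumCardPickupBruteForce cards out) := by unfold Spec_minimumCardPickupBruteForce; infer_instance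

-- ===== CLAIM (what is proved, stated in full; the proofs are below) =====
def Claim_equal_minimumCardPickupBruteForce : Prop := ∀ (cards : List Int), Dom_minimumCardPickupBruteForce cards → Spec_minimumCardPickupBruteForce cards (minimumCardPickupBruteForce cards)

-- ===== LEMMAS AND PROOFS =====

-- the common 'update the running minimum' step (A's match-expression, B's if-chain)
def pvOmin (ml : Option Int) (v : Int) : Option Int :=
  some (match ml with | none => v | some m => min m v)

-- value at position t of cards (all positions used are in range)
def pvVal (cards : List Int) (t : Nat) : Int := cards.getD t 0

-- the list of gaps B's loop feeds into its running minimum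
def pvGaps (last : PySem.Dict Int Int) (s : Int) : List Int → List Int
  | [] => []
  | x :: xs =>
    match PySem.Dict.get? last x with
    | some p => (s - p + 1) :: pvGaps (last.insert x s) (s + 1) xs
    | none => pvGaps (last.insert x s) (s + 1) xs

-- the list of lengths A's nested loops feed into its running minimum
def pvAList (cards : List Int) : List Int :=
  (PySem.List.pyRange 0 (cards.length : Int)).flatMap (fun i =>
    ((PySem.List.pyRange i (cards.length : Int)).filter (fun j => pvA_hasDup cards i j)).map
      (fun j => j - i + 1))

theorem pvOmin_foldl_some (l : List Int) (a : Int) :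
    l.foldl pvOmin (some a) = some (l.foldl min a) := by
  induction l generalizing a with
  | nil => rfl
  | cons x l ih => simpa [pvOmin] using ih (min a x)

theorem pvOmin_foldl_min? (l : List Int) : l.foldl pvOmin none = l.min? := by
  cases l with
  | nil => rfl
  | cons a l =>
    show List.foldl pvOmin (pvOmin none a) l = _
    rw [show pvOmin none a = some a from rfl, pvOmin_foldl_some]
    rfl

theorem pvFoldl_if_omin (c : Int → Bool) (g : Int → Int) (l : List Int) (ml : Option Int) :
    l.foldl (fun ml x => if c x then pvOmin ml (g x) else ml) ml
      = ((l.filter c).map g).foldl pvOmin ml := by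
  induction l generalizing ml with
  | nil => rfl
  | cons x l ih => by_cases h : c x <;> simp [h, ih]

theorem pvFoldl_flat (f : Int → List Int) (l : List Int) (ml : Option Int) :
    l.foldl (fun ml i => (f i).foldl pvOmin ml) ml = (l.flatMap f).foldl pvOmin ml := by
  induction l generalizing ml with
  | nil => rfl
  | cons x l ih => simp [List.flatMap_cons, List.foldl_append, ih]

theorem pvA_eq_min? (cards : List Int) :
    minimumCardPickupBruteForce cards = ((pvAList cards).min?).getD (-1) := by
  unfold minimumCardPickupBruteForce
  have h1 : ∀ (ml : Option Int) (i : Int),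
      (PySem.List.pyRange i (cards.length : Int)).foldl (fun ml j =>
        if pvA_hasDup cards i j then
          some (match ml with
                | none => j - i + 1
                | some m => min m (j - i + 1))
        else ml) ml
      = (((PySem.List.pyRange i (cards.length : Int)).filter
            (fun j => pvA_hasDup cards i j)).map (fun j => j - i + 1)).foldl pvOmin ml :=
    fun ml i => pvFoldl_if_omin _ _ _ ml
  simp only [h1]
  rw [pvFoldl_flat, pvOmin_foldl_min?]
  show _ = ((pvAList cards).min?).getD (-1)
  unfold pvAList
  cases (_ : List Int).min? <;> rfl

theorem pvB_loop_eq_gaps : ∀ (xs : List Int) (s : Int)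
    (best : Option Int) (last : PySem.Dict Int Int),
    pvB_loop best last (PySem.List.enumerate xs s) = (pvGaps last s xs).foldl pvOmin best := by
  intro xs
  induction xs with
  | nil => intro s best last; rfl
  | cons x xs ih =>
    intro s best last
    rw [PySem.List.enumerate_cons]
    show pvB_loop best last ((s, x) :: _) = _
    unfold pvB_loop pvGaps
    cases h : PySem.Dict.get? last x with
    | none => exact ih _ _ _
    | some p =>
      show pvB_loop (match best with
            | none => some (s - p + 1)
            | some b => if s - p + 1 < b then some (s - p + 1) else some b)
          (last.insert x s) (PySem.List.enumerate xs (s + 1))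
        = List.foldl pvOmin best ((s - p + 1) :: pvGaps (last.insert x s) (s + 1) xs)
      rw [ih]
      show _ = List.foldl pvOmin (pvOmin best (s - p + 1)) _
      congr 1
      cases best with
      | none => rfl
      | some b =>
        show (if s - p + 1 < b then some (s - p + 1) else some b) = some (min b (s - p + 1))
        split <;> (congr 1; omega)

theorem pvB_eq_min? (cards : List Int) :
    minimumCardPickupBruteForce_alt cards = ((pvGaps PySem.Dict.empty 0 cards).min?).getD (-1) := by
  unfold minimumCardPickupBruteForce_alt
  rw [show PySem.List.enumerate cards = PySem.List.enumerate cards 0 from rfl,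
    pvB_loop_eq_gaps cards 0 none PySem.Dict.empty, pvOmin_foldl_min?]
  cases (pvGaps PySem.Dict.empty 0 cards).min? <;> rfl

theorem pvDupLoop_iff (cards : List Int) : ∀ (ks : List Int) (seen : PySem.Set Int),
    seen.Nodup →
    (pvA_dupLoop cards seen ks = true ↔
      ¬ (seen ++ ks.map (fun k => PySem.List.pyGetD cards k 0)).Nodup) := by
  intro ks
  induction ks with
  | nil => intro seen hnd; simp [pvA_dupLoop, hnd]
  | cons k ks ih =>
    intro seen hnd
    show (if PySem.Set.contains seen (PySem.List.pyGetD cards k 0) then true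
          else pvA_dupLoop cards (PySem.Set.add seen (PySem.List.pyGetD cards k 0)) ks) = true ↔ _
    by_cases hm : PySem.List.pyGetD cards k 0 ∈ seen
    · rw [if_pos (by rw [PySem.Set.contains_iff]; exact hm)]
      simp only [List.map_cons, true_iff]
      intro hno
      exact (List.disjoint_of_nodup_append hno) hm List.mem_cons_self
    · rw [if_neg (by rw [PySem.Set.contains_iff]; exact hm)]
      rw [ih _ (PySem.Set.nodup_add _ _ hnd)]
      rw [PySem.Set.add_of_not_mem hm, List.append_assoc]
      simp

theorem pvHasDup_iff (cards : List Int) (i j : Nat) (hij : i ≤ j) :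
    (pvA_hasDup cards (i : Int) (j : Int) = true ↔
      ∃ p q : Nat, i ≤ p ∧ p < q ∧ q ≤ j ∧ pvVal cards p = pvVal cards q) := by
  unfold pvA_hasDup
  rw [pvDupLoop_iff cards _ PySem.Set.empty List.nodup_nil]
  have hc : (i : Int) < (j : Int) + 1 := by exact_mod_cast Nat.lt_succ_of_le hij
  have hcnt : (((j : Int) + 1 - (i : Int) + 1 - 1) / 1).toNat = j + 1 - i := by
    simp only [Int.ediv_one]; omega
  rw [PySem.List.pyRange_of_pos _ _ (by norm_num : (0:Int) < 1), if_pos hc, hcnt]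
  rw [show (PySem.Set.empty : PySem.Set Int) = [] from rfl, List.nil_append, List.map_map,
    List.nodup_iff_getElem?_ne_getElem?]
  push Not
  simp only [List.length_map, List.length_range, List.getElem?_map]
  constructor
  · rintro ⟨a, b, hab, hb, he⟩
    have ha : a < j + 1 - i := lt_trans hab hb
    rw [List.getElem?_range ha, List.getElem?_range hb] at he
    simp only [Function.comp_apply, Option.map_some, Option.some.injEq] at he
    refine ⟨i + a, i + b, by omega, by omega, by omega, ?_⟩
    have e1 : (i : Int) + 1 * (a : Int) = ((i + a : Nat) : Int) := by push_cast; ring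
    have e2 : (i : Int) + 1 * (b : Int) = ((i + b : Nat) : Int) := by push_cast; ring
    rw [e1, e2, PySem.List.pyGetD_natCast, PySem.List.pyGetD_natCast] at he
    exact he
  · rintro ⟨p, q, h1, h2, h3, h4⟩
    refine ⟨p - i, q - i, by omega, by omega, ?_⟩
    rw [List.getElem?_range (by omega : p - i < j + 1 - i),
      List.getElem?_range (by omega : q - i < j + 1 - i)]
    simp only [Function.comp_apply, Option.map_some, Option.some.injEq]
    have e1 : (i : Int) + 1 * ((p - i : Nat) : Int) = ((p : Nat) : Int) := by omega
    have e2 : (i : Int) + 1 * ((q - i : Nat) : Int) = ((q : Nat) : Int) := by omega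
    rw [e1, e2, PySem.List.pyGetD_natCast, PySem.List.pyGetD_natCast]
    exact h4

theorem pvMem_AList (cards : List Int) (m : Int) :
    m ∈ pvAList cards ↔ ∃ i j : Int, 0 ≤ i ∧ i ≤ j ∧ j < (cards.length : Int) ∧
      pvA_hasDup cards i j = true ∧ m = j - i + 1 := by
  unfold pvAList
  simp only [List.mem_flatMap, List.mem_map, List.mem_filter, PySem.List.mem_pyRange_one]
  constructor
  · rintro ⟨i, ⟨h0, h1⟩, j, ⟨⟨h2, h3⟩, h4⟩, h5⟩
    exact ⟨i, j, h0, h2, h3, h4, h5.symm⟩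
  · rintro ⟨i, j, h0, h2, h3, h4, h5⟩
    exact ⟨i, ⟨h0, by omega⟩, j, ⟨⟨h2, h3⟩, h4⟩, h5.symm⟩

theorem pvGaps_sound (cards : List Int) : ∀ (xs : List Int) (s : Nat)
    (last : PySem.Dict Int Int),
    xs = cards.drop s →
    (∀ c p, PySem.Dict.get? last c = some p →
      ∃ p' : Nat, p = (p' : Int) ∧ p' < s ∧ pvVal cards p' = c) →
    ∀ m ∈ pvGaps last (s : Int) xs, ∃ p q : Nat, p < q ∧ q < cards.length ∧
      pvVal cards p = pvVal cards q ∧ m = (q : Int) - (p : Int) + 1 := by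
  intro xs
  induction xs with
  | nil => intro s last _ _ m hm; simp [pvGaps] at hm
  | cons x xs ih =>
    intro s last hdrop hinv m hm
    have hs : s < cards.length := by
      by_contra h
      rw [List.drop_eq_nil_of_le (by omega)] at hdrop
      exact (List.cons_ne_nil x xs) hdrop
    have hcons := (List.drop_eq_getElem_cons hs).symm.trans hdrop.symm
    obtain ⟨hx', hxs'⟩ := (List.cons.injEq _ _ _ _).mp hcons
    have hx : x = pvVal cards s := by
      rw [← hx']
      unfold pvVal
      rw [List.getD_eq_getElem?_getD, List.getElem?_eq_getElem hs, Option.getD_some]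
    have hxs : xs = cards.drop (s + 1) := hxs'.symm
    have hcast : ((s : Int) + 1) = ((s + 1 : Nat) : Int) := by push_cast; ring
    unfold pvGaps at hm
    cases hlk : PySem.Dict.get? last x with
    | some p =>
      rw [hlk] at hm
      rcases List.mem_cons.mp hm with hhead | htail
      · obtain ⟨p', rfl, hp's, hval⟩ := hinv x p hlk
        exact ⟨p', s, hp's, hs, by rw [hval, hx], by omega⟩
      · rw [hcast] at htail
        refine ih (s + 1) _ hxs ?_ m htail
        intro c p0 h
        rw [PySem.Dict.get?_insert] at h
        split at h
        · rename_i hceq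
          injection h with h
          exact ⟨s, h.symm, by omega, by rw [← hceq] at hx; exact hx.symm⟩
        · obtain ⟨p', e, hlt, hv⟩ := hinv c p0 h
          exact ⟨p', e, by omega, hv⟩
    | none =>
      rw [hlk, hcast] at hm
      refine ih (s + 1) _ hxs ?_ m hm
      intro c p0 h
      rw [PySem.Dict.get?_insert] at h
      split at h
      · rename_i hceq
        injection h with h
        exact ⟨s, h.symm, by omega, by rw [← hceq] at hx; exact hx.symm⟩
      · obtain ⟨p', e, hlt, hv⟩ := hinv c p0 h
        exact ⟨p', e, by omega, hv⟩

theorem pvGaps_complete (cards : List Int) : ∀ (xs : List Int) (s : Nat)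
    (last : PySem.Dict Int Int),
    xs = cards.drop s →
    (∀ p : Nat, p < s → ∃ p' : Int,
      PySem.Dict.get? last (pvVal cards p) = some p' ∧ (p : Int) ≤ p') →
    ∀ p q : Nat, p < q → s ≤ q → q < cards.length → pvVal cards p = pvVal cards q →
    ∃ m ∈ pvGaps last (s : Int) xs, m ≤ (q : Int) - (p : Int) + 1 := by
  intro xs
  induction xs with
  | nil =>
    intro s last hdrop _ p q hpq hsq hq _
    exfalso
    have := congrArg List.length hdrop
    simp [List.length_drop] at this
    omega
  | cons x xs ih =>
    intro s last hdrop hinv p q hpq hsq hq hval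
    have hs : s < cards.length := by omega
    have hcons := (List.drop_eq_getElem_cons hs).symm.trans hdrop.symm
    obtain ⟨hx', hxs'⟩ := (List.cons.injEq _ _ _ _).mp hcons
    have hx : x = pvVal cards s := by
      rw [← hx']
      unfold pvVal
      rw [List.getD_eq_getElem?_getD, List.getElem?_eq_getElem hs, Option.getD_some]
    have hxs : xs = cards.drop (s + 1) := hxs'.symm
    have hcast : ((s : Int) + 1) = ((s + 1 : Nat) : Int) := by push_cast; ring
    rcases Nat.eq_or_lt_of_le hsq with hqs | hqs'
    · -- q = s : the dict already holds a late-enough previous occurrence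
      have hps : p < s := by omega
      obtain ⟨p', hget, hpp'⟩ := hinv p hps
      have hgx : PySem.Dict.get? last x = some p' := by
        rw [hx, show pvVal cards s = pvVal cards p by rw [hval, ← hqs]]
        exact hget
      refine ⟨(s : Int) - p' + 1, ?_, by omega⟩
      simp [pvGaps, hgx]
    · have hinv' : ∀ p0 : Nat, p0 < s + 1 → ∃ p' : Int,
          PySem.Dict.get? (last.insert x (s : Int)) (pvVal cards p0) = some p' ∧ (p0 : Int) ≤ p' := by
        intro p0 hp0
        rw [PySem.Dict.get?_insert]
        by_cases hc0 : pvVal cards p0 = x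
        · rw [if_pos hc0]
          exact ⟨(s : Int), rfl, by omega⟩
        · rw [if_neg hc0]
          have hp0s : p0 < s := by
            rcases Nat.lt_succ_iff_lt_or_eq.mp hp0 with h | h
            · exact h
            · exact absurd (by rw [h, ← hx]) hc0
          obtain ⟨p', h1, h2⟩ := hinv p0 hp0s
          exact ⟨p', h1, h2⟩
      obtain ⟨m, hmem, hle⟩ := ih (s + 1) (last.insert x (s : Int)) hxs hinv' p q hpq (by omega) hq hval
      refine ⟨m, ?_, hle⟩
      cases hlk : PySem.Dict.get? last x with
      | some p0 =>
        simp only [pvGaps, hlk]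
        rw [hcast]
        exact List.mem_cons_of_mem _ hmem
      | none =>
        simp only [pvGaps, hlk]
        rw [hcast]
        exact hmem

theorem pvMin?_eq_of_dominates (L1 L2 : List Int)
    (h1 : ∀ a ∈ L1, ∃ b ∈ L2, b ≤ a) (h2 : ∀ b ∈ L2, ∃ a ∈ L1, a ≤ b) :
    L1.min? = L2.min? := by
  rcases hL1 : L1.min? with _ | a
  · rw [List.min?_eq_none_iff] at hL1
    subst hL1
    rcases hL2 : L2 with _ | ⟨b, L2'⟩
    · rfl
    · obtain ⟨a, ha, -⟩ := h2 b (hL2 ▸ List.mem_cons_self)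
      exact absurd ha List.not_mem_nil
  · rw [List.min?_eq_some_iff] at hL1
    obtain ⟨haMem, haMin⟩ := hL1
    obtain ⟨b, hb, hba⟩ := h1 a haMem
    obtain ⟨a', ha', ha'b⟩ := h2 b hb
    have hab : a = b := le_antisymm (le_trans (haMin a' ha') ha'b) hba
    symm
    rw [List.min?_eq_some_iff]
    refine ⟨hab ▸ hb, fun b' hb' => ?_⟩
    obtain ⟨a2, ha2, h⟩ := h2 b' hb'
    exact le_trans (haMin a2 ha2) h

-- ===== VERDICT (by name: the statement is the Claim_ definition above) =====
theorem minimumCardPickupBruteForce_spec : Claim_equal_minimumCardPickupBruteForce := by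
  intro cards _
  unfold Spec_minimumCardPickupBruteForce
  rw [pvA_eq_min?, pvB_eq_min?]
  congr 1
  apply pvMin?_eq_of_dominates
  · intro a ha
    rw [pvMem_AList] at ha
    obtain ⟨i, j, h0, h1, h2, hdup, rfl⟩ := ha
    have hij : i.toNat ≤ j.toNat := by omega
    have hi : ((i.toNat : Nat) : Int) = i := Int.toNat_of_nonneg h0
    have hj : ((j.toNat : Nat) : Int) = j := Int.toNat_of_nonneg (by omega)
    rw [← hi, ← hj] at hdup
    obtain ⟨p, q, hp1, hp2, hp3, hveq⟩ := (pvHasDup_iff cards _ _ hij).mp hdup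
    obtain ⟨m, hmem, hle⟩ := pvGaps_complete cards cards 0 PySem.Dict.empty
      List.drop_zero.symm (fun p hp => absurd hp (Nat.not_lt_zero p)) p q hp2
      (Nat.zero_le q) (by omega) hveq
    refine ⟨m, by simpa using hmem, by omega⟩
  · intro b hb
    obtain ⟨p, q, hpq, hq, hveq, rfl⟩ := pvGaps_sound cards cards 0 PySem.Dict.empty
      List.drop_zero.symm
      (fun c p h => by rw [PySem.Dict.get?_empty] at h; cases h)
      b (by simpa using hb)
    refine ⟨(q : Int) - (p : Int) + 1, ?_, le_refl _⟩
    rw [pvMem_AList]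
    refine ⟨(p : Int), (q : Int), by omega, by omega, by exact_mod_cast hq, ?_, rfl⟩
    exact (pvHasDup_iff cards p q (by omega)).mpr ⟨p, q, le_refl p, hpq, le_refl q, hveq⟩
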